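-- pv_equiv track=rewrite | github.com/RRayo/scripts | dataStructures/numberOfItems.py | countItems
-- ===== SOURCE A (Python) =====
-- def countItems(s):
--     total_items = 0
--     temp_counter = 0
--     start = False
--     for char in s:
--         if char == "|": # add at the end
--             total_items += temp_counter
--             temp_counter = 0
--             start = True
--         elif start:
--             temp_counter += 1
--     return total_items
-- ===== SOURCE B (Python) =====
-- def countItems(s):
--     chars = list(s)
--     return sum(1 for i, c in enumerate(chars)
--                if c != '|' and '|' in chars[:i] and '|' in chars[i+1:])
-- ===== Notes on version B (the rewrite author's own statement) =====
-- stated objective: simpler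
-- what changed: Replaces A's flag-and-deferred-counter state machine with a one-line declarative count of the non-delimiter characters that have a pipe delimiter somewhere before and somewhere after them (quadratic, so not faster).
import Mathlib
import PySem

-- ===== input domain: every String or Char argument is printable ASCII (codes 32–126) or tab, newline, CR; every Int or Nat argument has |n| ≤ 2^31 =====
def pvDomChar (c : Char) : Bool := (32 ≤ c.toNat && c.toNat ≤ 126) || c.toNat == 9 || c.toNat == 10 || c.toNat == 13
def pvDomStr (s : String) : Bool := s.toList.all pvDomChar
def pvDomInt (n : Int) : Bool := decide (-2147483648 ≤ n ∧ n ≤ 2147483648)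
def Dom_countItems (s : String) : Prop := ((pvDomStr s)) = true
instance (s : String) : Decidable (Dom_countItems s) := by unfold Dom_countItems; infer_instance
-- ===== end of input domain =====

-- B replaces A's flag-and-deferred-counter state machine with a one-line declarative count
-- of the non-delimiter characters that have a pipe delimiter somewhere before and somewhere
-- after them (simpler to read; quadratic, so not faster).

-- ===== PORT A =====
def countItems (s : String) : Int :=
  (s.toList.foldl
    (fun st ch =>
      if ch = '|' then (st.1 + st.2.1, (0 : Int), true)
      else if st.2.2 then (st.1, st.2.1 + 1, st.2.2)
      else st)
    ((0 : Int), (0 : Int), false)).1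

-- ===== PORT B =====
def countItems_alt (s : String) : Int :=
  ((PySem.List.enumerate s.toList).map (fun ic =>
      if ic.2 ≠ '|' ∧ PySem.Chars.isIn ['|'] (PySem.List.slice s.toList none (some ic.1)) = true
                    ∧ PySem.Chars.isIn ['|'] (PySem.List.slice s.toList (some (ic.1 + 1)) none) = true
      then (1 : Int) else 0)).sum

-- ===== PRECONDITION & SPEC =====
def Spec_countItems (s : String) (out : Int) : Prop := out = countItems_alt s
instance (s : String) (out : Int) : Decidable (Spec_countItems s out) := by unfold Spec_countItems; infer_instance

-- ===== CLAIM (what is proved, stated in full; the proofs are below) =====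
def Claim_equal_countItems : Prop := ∀ (s : String), Dom_countItems s → Spec_countItems s (countItems s)

-- ===== LEMMAS AND PROOFS =====

-- non-pipe chars of l that still have a pipe after them (value of A's loop once a pipe was seen)
def pvH : List Char → Int
  | [] => 0
  | x :: xs => if '|' ∈ xs then (if x = '|' then 0 else 1) + pvH xs else 0

-- A's result: skip to the first pipe, then pvH of the rest
def pvG : List Char → Int
  | [] => 0
  | x :: xs => if x = '|' then pvH xs else pvG xs

-- B's sum, with a flag 'a pipe occurred in the part already consumed'
def pvE : Bool → List Char → Int
  | _, [] => 0
  | b, y :: ys => (if y ≠ '|' ∧ b = true ∧ '|' ∈ ys then (1 : Int) else 0) + pvE (b || decide (y = '|')) ys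

theorem pvH_of_not_mem (l : List Char) (h : '|' ∉ l) : pvH l = 0 := by
  cases l with
  | nil => rfl
  | cons x xs =>
      simp [List.mem_cons, not_or] at h
      simp [pvH, h.2]

theorem pv_isIn_singleton (c : Char) (l : List Char) :
    PySem.Chars.isIn [c] l = true ↔ c ∈ l := by
  rw [PySem.Chars.isIn_iff_infix]
  constructor
  · intro h; exact h.mem (by simp)
  · intro h
    obtain ⟨p, q, rfl⟩ := List.append_of_mem h
    exact ⟨p, q, by simp⟩

theorem pvA_loop_true (l : List Char) (t c : Int) :
    (l.foldl
      (fun st ch =>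
        if ch = '|' then (st.1 + st.2.1, (0 : Int), true)
        else if st.2.2 then (st.1, st.2.1 + 1, st.2.2)
        else st)
      (t, c, true)).1 = t + (if '|' ∈ l then c else 0) + pvH l := by
  induction l generalizing t c with
  | nil => simp [pvH]
  | cons x xs ih =>
      by_cases hx : x = '|'
      · subst hx
        by_cases hm : '|' ∈ xs
        · simp [List.foldl_cons, ih, pvH, hm]
        · simp [List.foldl_cons, ih, pvH, hm, pvH_of_not_mem xs hm]
      · by_cases hm : '|' ∈ xs
        · simp [List.foldl_cons, hx, ih, pvH, hm]
          ring
        · have hmc : ¬ '|' ∈ x :: xs := by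
            intro h
            rcases List.mem_cons.mp h with h | h
            · exact hx h.symm
            · exact hm h
          simp [List.foldl_cons, hx, ih, pvH, hm, hmc, pvH_of_not_mem xs hm]

theorem pvA_loop_false (l : List Char) (t : Int) :
    (l.foldl
      (fun st ch =>
        if ch = '|' then (st.1 + st.2.1, (0 : Int), true)
        else if st.2.2 then (st.1, st.2.1 + 1, st.2.2)
        else st)
      (t, 0, false)).1 = t + pvG l := by
  induction l generalizing t with
  | nil => simp [pvG]
  | cons x xs ih =>
      by_cases hx : x = '|'
      · subst hx
        simp [List.foldl_cons, pvA_loop_true, pvG]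
      · simp [List.foldl_cons, hx, ih, pvG]

theorem pvE_true_eq_pvH (l : List Char) : pvE true l = pvH l := by
  induction l with
  | nil => rfl
  | cons y ys ih =>
      by_cases hm : '|' ∈ ys
      · by_cases hy : y = '|' <;> simp [pvE, pvH, hm, hy, ih]
      · simp [pvE, pvH, hm, ih, pvH_of_not_mem ys hm]

theorem pvE_false_eq_pvG (l : List Char) : pvE false l = pvG l := by
  induction l with
  | nil => rfl
  | cons y ys ih =>
      by_cases hy : y = '|'
      · simp [pvE, pvG, hy, pvE_true_eq_pvH]
      · simp [pvE, pvG, hy, ih]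

theorem pvB_enum_sum (pre l : List Char) :
    ((PySem.List.enumerate l (pre.length : Int)).map (fun ic =>
        if ic.2 ≠ '|' ∧ PySem.Chars.isIn ['|'] (PySem.List.slice (pre ++ l) none (some ic.1)) = true
                      ∧ PySem.Chars.isIn ['|'] (PySem.List.slice (pre ++ l) (some (ic.1 + 1)) none) = true
        then (1 : Int) else 0)).sum = pvE (decide ('|' ∈ pre)) l := by
  induction l generalizing pre with
  | nil => simp [PySem.List.enumerate_nil, pvE]
  | cons y ys ih =>
      rw [PySem.List.enumerate_cons, List.map_cons, List.sum_cons]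
      have h3 : ((pre.length : Int) + 1) = (((pre ++ [y]).length : Nat) : Int) := by
        simp
      have he : pre ++ y :: ys = (pre ++ [y]) ++ ys := by simp
      have h1 : PySem.List.slice (pre ++ y :: ys) none (some (pre.length : Int)) = pre := by
        rw [PySem.List.slice_to_natCast]
        exact List.take_left
      have h2 : PySem.List.slice (pre ++ y :: ys) (some ((pre.length : Int) + 1)) none = ys := by
        rw [h3, he, PySem.List.slice_from_natCast]
        exact List.drop_left
      have htail := ih (pre ++ [y])
      rw [← he, ← h3] at htail
      rw [htail, h1, h2]
      have hflag : (decide ('|' ∈ pre ++ [y])) = ((decide ('|' ∈ pre)) || decide (y = '|')) := by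
        by_cases hy : y = '|' <;> by_cases hp : '|' ∈ pre <;>
          simp [hy, hp, List.mem_append, eq_comm]
      rw [hflag]
      by_cases hy : y = '|' <;> by_cases hp : '|' ∈ pre <;> by_cases hm : '|' ∈ ys <;>
        simp [pvE, pv_isIn_singleton, hy, hp, hm]

-- ===== VERDICT (by name: the statement is the Claim_ definition above) =====
theorem countItems_spec : Claim_equal_countItems := by
  intro s _
  unfold Spec_countItems countItems countItems_alt
  have hb := pvB_enum_sum [] s.toList
  simp only [List.nil_append, List.length_nil, Nat.cast_zero] at hb
  have hd : (decide ('|' ∈ ([] : List Char))) = false := by decide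
  rw [hd] at hb
  rw [pvA_loop_false s.toList 0, zero_add,
    show pvG s.toList = pvE false s.toList from (pvE_false_eq_pvG _).symm]
  exact hb.symm
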